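-- pv_equiv track=rewrite | github.com/xuchenxu168/Comfyui-Index-TTS2 | audio_browser.py | _sort_and_optimize_files
-- ===== SOURCE A (Python) =====
-- def _sort_and_optimize_files(files):
--     """排序和优化文件列表"""
--     def get_sort_priority(file_path):
--         """获取文件的排序优先级"""
--         path_lower = file_path.lower()
--
--         # 优先级1: input/audio目录
--         if 'input' in path_lower and 'audio' in path_lower:
--             return (1, file_path)
--
--         # 优先级2: input目录
--         elif 'input' in path_lower:
--             return (2, file_path)
--
--         # 优先级3: 插件audio目录
--         elif 'comfyui-index-tts2' in path_lower and 'audio' in path_lower: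
--             return (3, file_path)
--
--         # 优先级4: 其他audio目录
--         elif 'audio' in path_lower:
--             return (4, file_path)
--
--         # 优先级5: 其他文件
--         else:
--             return (5, file_path)
--
--     # 排序
--     sorted_files = sorted(files, key=get_sort_priority)
--
--     # 去重
--     seen = set()
--     unique_files = []
--     for file_path in sorted_files:
--         if file_path not in seen:
--             seen.add(file_path)
--             unique_files.append(file_path)
--
--     return unique_files
-- ===== SOURCE B (Python) =====
-- def _sort_and_optimize_files(files):
--     """Partition into five priority buckets in one pass, then emit each bucket's
--     sorted distinct paths in priority order (same result as sort-by-composite-key + dedup)."""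
--     buckets = ([], [], [], [], [])
--     for file_path in files:
--         path_lower = file_path.lower()
--         if 'input' in path_lower and 'audio' in path_lower:
--             buckets[0].append(file_path)
--         elif 'input' in path_lower:
--             buckets[1].append(file_path)
--         elif 'comfyui-index-tts2' in path_lower and 'audio' in path_lower:
--             buckets[2].append(file_path)
--         elif 'audio' in path_lower:
--             buckets[3].append(file_path)
--         else:
--             buckets[4].append(file_path)
--     result = []
--     for bucket in buckets:
--         result.extend(sorted(set(bucket)))
--     return result
-- ===== Notes on version B (the rewrite author's own statement) =====
-- stated objective: alternative
-- what changed: Replaces the single composite-key (priority, path) sort followed by a seen-set dedup pass with a one-pass partition into five priority buckets, each bucket then emitted as its sorted set of distinct paths and concatenated in priority order.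
import Mathlib
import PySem

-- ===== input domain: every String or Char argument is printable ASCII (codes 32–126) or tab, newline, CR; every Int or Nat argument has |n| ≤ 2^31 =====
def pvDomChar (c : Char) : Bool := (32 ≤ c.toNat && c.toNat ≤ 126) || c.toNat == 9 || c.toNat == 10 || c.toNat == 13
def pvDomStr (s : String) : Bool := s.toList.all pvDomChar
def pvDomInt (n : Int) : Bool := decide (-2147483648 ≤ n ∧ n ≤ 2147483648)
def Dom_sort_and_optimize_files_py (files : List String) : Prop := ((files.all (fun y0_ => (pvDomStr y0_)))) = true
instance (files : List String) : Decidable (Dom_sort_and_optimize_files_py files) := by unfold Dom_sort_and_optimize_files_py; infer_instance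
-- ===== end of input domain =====

-- B partitions files into five priority buckets in one pass and concatenates each bucket's
-- sorted distinct paths, instead of A's composite-key sort followed by a seen-set dedup pass
-- (alternative decomposition, same result).

-- ===== PORT A =====
-- Python's inner helper get_sort_priority(file_path) -> (priority, file_path)
def getSortPriority (file_path : String) : Int × String :=
  if PySem.Str.isIn "input" (PySem.Str.lower file_path) && PySem.Str.isIn "audio" (PySem.Str.lower file_path) then (1, file_path)
  else if PySem.Str.isIn "input" (PySem.Str.lower file_path) then (2, file_path)
  else if PySem.Str.isIn "comfyui-index-tts2" (PySem.Str.lower file_path) && PySem.Str.isIn "audio" (PySem.Str.lower file_path) then (3, file_path)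
  else if PySem.Str.isIn "audio" (PySem.Str.lower file_path) then (4, file_path)
  else (5, file_path)

-- sorted_files = sorted(files, key=get_sort_priority); then the seen-set dedup loop
def sort_and_optimize_files_py (files : List String) : List String :=
  (List.foldl
    (fun (st : PySem.Set String × List String) file_path =>
      if !(PySem.Set.contains st.1 file_path) then
        (PySem.Set.add st.1 file_path, st.2 ++ [file_path])
      else st)
    (PySem.Set.empty, [])
    (PySem.List.sorted2 files (fun f => (getSortPriority f).1) (fun f => (getSortPriority f).2))).2

-- ===== PORT B =====
def sort_and_optimize_files_py_alt (files : List String) : List String :=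
  let b := files.foldl
    (fun (st : List String × List String × List String × List String × List String) file_path =>
      if PySem.Str.isIn "input" (PySem.Str.lower file_path) && PySem.Str.isIn "audio" (PySem.Str.lower file_path) then
        (st.1 ++ [file_path], st.2.1, st.2.2.1, st.2.2.2.1, st.2.2.2.2)
      else if PySem.Str.isIn "input" (PySem.Str.lower file_path) then
        (st.1, st.2.1 ++ [file_path], st.2.2.1, st.2.2.2.1, st.2.2.2.2)
      else if PySem.Str.isIn "comfyui-index-tts2" (PySem.Str.lower file_path) && PySem.Str.isIn "audio" (PySem.Str.lower file_path) then
        (st.1, st.2.1, st.2.2.1 ++ [file_path], st.2.2.2.1, st.2.2.2.2)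
      else if PySem.Str.isIn "audio" (PySem.Str.lower file_path) then
        (st.1, st.2.1, st.2.2.1, st.2.2.2.1 ++ [file_path], st.2.2.2.2)
      else
        (st.1, st.2.1, st.2.2.1, st.2.2.2.1, st.2.2.2.2 ++ [file_path]))
    ([], [], [], [], [])
  PySem.List.sorted (PySem.Set.ofList b.1) (fun x => x) ++
  PySem.List.sorted (PySem.Set.ofList b.2.1) (fun x => x) ++
  PySem.List.sorted (PySem.Set.ofList b.2.2.1) (fun x => x) ++
  PySem.List.sorted (PySem.Set.ofList b.2.2.2.1) (fun x => x) ++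
  PySem.List.sorted (PySem.Set.ofList b.2.2.2.2) (fun x => x)

-- ===== PRECONDITION & SPEC =====
def Spec_sort_and_optimize_files_py (files : List String) (out : List String) : Prop := out = sort_and_optimize_files_py_alt files
instance (files : List String) (out : List String) : Decidable (Spec_sort_and_optimize_files_py files out) := by unfold Spec_sort_and_optimize_files_py; infer_instance

-- ===== CLAIM (what is proved, stated in full; the proofs are below) =====
def Claim_equal_sort_and_optimize_files_py : Prop := ∀ (files : List String), Dom_sort_and_optimize_files_py files → Spec_sort_and_optimize_files_py files (sort_and_optimize_files_py files)

-- ===== LEMMAS AND PROOFS =====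

-- A's composite sort key (priority, file_path), as one lexicographic key
def pvKey (f : String) : Lex (Int × String) := toLex ((getSortPriority f).1, f)

theorem pvKey_injective : Function.Injective pvKey := by
  intro a b h
  have : (ofLex (pvKey a)).2 = (ofLex (pvKey b)).2 := by rw [h]
  simpa [pvKey] using this

theorem pvSnd (f : String) : (getSortPriority f).2 = f := by
  unfold getSortPriority; split_ifs <;> rfl

theorem pvBefore_eq (a b : String) :
    (decide ((getSortPriority a).1 < (getSortPriority b).1) ||
      !decide ((getSortPriority b).1 < (getSortPriority a).1) &&
        decide ((getSortPriority a).2 < (getSortPriority b).2)) = decide (pvKey a < pvKey b) := by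
  simp only [pvSnd, pvKey]
  rcases lt_trichotomy ((getSortPriority a).1) ((getSortPriority b).1) with h | h | h
  · simp [Prod.Lex.toLex_lt_toLex, h, not_lt_of_gt h]
  · simp [Prod.Lex.toLex_lt_toLex, h]
  · simp only [Prod.Lex.toLex_lt_toLex]
    have h1 : ¬ ((getSortPriority a).1 < (getSortPriority b).1) := not_lt_of_gt h
    have h2 : ¬ ((getSortPriority a).1 = (getSortPriority b).1) := ne_of_gt h
    simp only [h1, h2, false_or] at *
    simp [h1, h2]
    intro hle
    exact absurd hle (not_le.mpr h)

-- A's tuple-key sort is the sort by the single lexicographic key pvKey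
theorem pvSorted2_eq (files : List String) :
    PySem.List.sorted2 files (fun f => (getSortPriority f).1) (fun f => (getSortPriority f).2)
      = PySem.List.sorted files pvKey := by
  rw [PySem.List.sorted_eq_foldl_insertBy]
  unfold PySem.List.sorted2
  simp only [Bool.false_eq_true, if_false]
  congr 1
  funext acc x
  congr 1
  funext a b
  exact pvBefore_eq a b

-- A's seen-set loop keeps seen = output; both equal the running Set.add fold
theorem pvDedupLoop (xs : List String) (s : PySem.Set String) :
    xs.foldl
      (fun (st : PySem.Set String × List String) fp =>
        if !(PySem.Set.contains st.1 fp) then (PySem.Set.add st.1 fp, st.2 ++ [fp]) else st)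
      (s, s)
    = (xs.foldl PySem.Set.add s, xs.foldl PySem.Set.add s) := by
  induction xs generalizing s with
  | nil => rfl
  | cons x t ih =>
    simp only [List.foldl_cons]
    by_cases h : x ∈ s
    · have ha : PySem.Set.add s x = s := by simp [PySem.Set.add, PySem.Set.contains_iff, h]
      rw [show (if !(PySem.Set.contains s x) then (PySem.Set.add s x, s ++ [x]) else (s, s)) = (s, s) by simp [PySem.Set.contains_iff, h]]
      rw [ih s, ha]
    · have ha : PySem.Set.add s x = s ++ [x] := by simp [PySem.Set.add, PySem.Set.contains_iff, h]
      rw [show (if !(PySem.Set.contains s x) then (PySem.Set.add s x, s ++ [x]) else (s, s))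
            = (PySem.Set.add s x, PySem.Set.add s x) by simp [PySem.Set.contains_iff, h, ha]]
      exact ih (PySem.Set.add s x)

theorem pvFoldlAdd_sublist (xs : List String) (s : List String) :
    (xs.foldl PySem.Set.add s).Sublist (s ++ xs) := by
  induction xs generalizing s with
  | nil => simp
  | cons x t ih =>
    simp only [List.foldl_cons]
    by_cases h : x ∈ s
    · have ha : PySem.Set.add s x = s := by simp [PySem.Set.add, PySem.Set.contains_iff, h]
      rw [ha]
      exact (ih s).trans (List.Sublist.append_left (List.sublist_cons_self x t) s)
    · have ha : PySem.Set.add s x = s ++ [x] := by simp [PySem.Set.add, PySem.Set.contains_iff, h]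
      rw [ha]
      simpa using ih (s ++ [x])

theorem pvA_eq_dedup (files : List String) :
    sort_and_optimize_files_py files
      = PySem.Set.ofList (PySem.List.sorted files pvKey) := by
  unfold sort_and_optimize_files_py
  rw [pvSorted2_eq]
  rw [show ((PySem.Set.empty : PySem.Set String), ([] : List String))
        = ((PySem.Set.empty : PySem.Set String), (PySem.Set.empty : PySem.Set String)) from rfl]
  rw [pvDedupLoop]
  rfl

theorem pvPrio_range (f : String) :
    (getSortPriority f).1 = 1 ∨ (getSortPriority f).1 = 2 ∨ (getSortPriority f).1 = 3 ∨
    (getSortPriority f).1 = 4 ∨ (getSortPriority f).1 = 5 := by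
  unfold getSortPriority; split_ifs <;> simp

-- B's partition loop yields the five priority filters
theorem pvBuckets (files : List String) (a b c d e : List String) :
    files.foldl
      (fun (st : List String × List String × List String × List String × List String) file_path =>
        if PySem.Str.isIn "input" (PySem.Str.lower file_path) && PySem.Str.isIn "audio" (PySem.Str.lower file_path) then
          (st.1 ++ [file_path], st.2.1, st.2.2.1, st.2.2.2.1, st.2.2.2.2)
        else if PySem.Str.isIn "input" (PySem.Str.lower file_path) then
          (st.1, st.2.1 ++ [file_path], st.2.2.1, st.2.2.2.1, st.2.2.2.2)
        else if PySem.Str.isIn "comfyui-index-tts2" (PySem.Str.lower file_path) && PySem.Str.isIn "audio" (PySem.Str.lower file_path) then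
          (st.1, st.2.1, st.2.2.1 ++ [file_path], st.2.2.2.1, st.2.2.2.2)
        else if PySem.Str.isIn "audio" (PySem.Str.lower file_path) then
          (st.1, st.2.1, st.2.2.1, st.2.2.2.1 ++ [file_path], st.2.2.2.2)
        else
          (st.1, st.2.1, st.2.2.1, st.2.2.2.1, st.2.2.2.2 ++ [file_path]))
      (a, b, c, d, e)
    = (a ++ files.filter (fun f => (getSortPriority f).1 == 1),
       b ++ files.filter (fun f => (getSortPriority f).1 == 2),
       c ++ files.filter (fun f => (getSortPriority f).1 == 3),
       d ++ files.filter (fun f => (getSortPriority f).1 == 4),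
       e ++ files.filter (fun f => (getSortPriority f).1 == 5)) := by
  induction files generalizing a b c d e with
  | nil => simp
  | cons x t ih =>
    simp only [List.foldl_cons, List.filter_cons]
    by_cases h1 : (PySem.Str.isIn "input" (PySem.Str.lower x) && PySem.Str.isIn "audio" (PySem.Str.lower x)) = true
    · have hp : (getSortPriority x).1 = 1 := by unfold getSortPriority; rw [if_pos h1]
      rw [if_pos h1, ih]
      simp [hp, List.append_assoc]
    · by_cases h2 : PySem.Str.isIn "input" (PySem.Str.lower x) = true
      · have hp : (getSortPriority x).1 = 2 := by unfold getSortPriority; rw [if_neg h1, if_pos h2]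
        rw [if_neg h1, if_pos h2, ih]
        simp [hp, List.append_assoc]
      · by_cases h3 : (PySem.Str.isIn "comfyui-index-tts2" (PySem.Str.lower x) && PySem.Str.isIn "audio" (PySem.Str.lower x)) = true
        · have hp : (getSortPriority x).1 = 3 := by unfold getSortPriority; rw [if_neg h1, if_neg h2, if_pos h3]
          rw [if_neg h1, if_neg h2, if_pos h3, ih]
          simp [hp, List.append_assoc]
        · by_cases h4 : PySem.Str.isIn "audio" (PySem.Str.lower x) = true
          · have hp : (getSortPriority x).1 = 4 := by unfold getSortPriority; rw [if_neg h1, if_neg h2, if_neg h3, if_pos h4]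
            rw [if_neg h1, if_neg h2, if_neg h3, if_pos h4, ih]
            simp [hp, List.append_assoc]
          · have hp : (getSortPriority x).1 = 5 := by unfold getSortPriority; rw [if_neg h1, if_neg h2, if_neg h3, if_neg h4]
            rw [if_neg h1, if_neg h2, if_neg h3, if_neg h4, ih]
            simp [hp, List.append_assoc]

-- one emitted bucket of B: sorted distinct priority-i files
def pvBucketOut (files : List String) (i : Int) : List String :=
  PySem.List.sorted (PySem.Set.ofList (files.filter (fun f => (getSortPriority f).1 == i))) (fun x => x)

theorem pvMem_bucketOut (files : List String) (i : Int) (x : String) :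
    x ∈ pvBucketOut files i ↔ x ∈ files ∧ (getSortPriority x).1 = i := by
  simp [pvBucketOut, PySem.List.mem_sorted, PySem.Set.mem_ofList, List.mem_filter]

theorem pvBucketOut_pairwise (files : List String) (i : Int) :
    (pvBucketOut files i).Pairwise (fun a b => pvKey a < pvKey b) := by
  have h := PySem.List.sorted_ofList_pairwise_lt (files.filter (fun f => (getSortPriority f).1 == i))
  refine List.pairwise_iff_forall_sublist.mpr ?_
  intro a b hs
  have hmem_a : a ∈ pvBucketOut files i := hs.subset (by simp)
  have hmem_b : b ∈ pvBucketOut files i := hs.subset (by simp)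
  have hlt : a < b := List.pairwise_iff_forall_sublist.mp h hs
  have ha := (pvMem_bucketOut files i a).mp hmem_a
  have hb := (pvMem_bucketOut files i b).mp hmem_b
  simp only [pvKey, Prod.Lex.toLex_lt_toLex]
  right
  exact ⟨by rw [ha.2, hb.2], hlt⟩

theorem pvB_eq (files : List String) :
    sort_and_optimize_files_py_alt files
      = pvBucketOut files 1 ++ pvBucketOut files 2 ++ pvBucketOut files 3 ++
        pvBucketOut files 4 ++ pvBucketOut files 5 := by
  unfold sort_and_optimize_files_py_alt
  rw [pvBuckets]
  simp [pvBucketOut, List.append_assoc]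

theorem pvRHS_pairwise (files : List String) :
    (pvBucketOut files 1 ++ pvBucketOut files 2 ++ pvBucketOut files 3 ++
      pvBucketOut files 4 ++ pvBucketOut files 5).Pairwise (fun a b => pvKey a < pvKey b) := by
  have cross : ∀ (i j : Int), i < j → ∀ a ∈ pvBucketOut files i, ∀ b ∈ pvBucketOut files j,
      pvKey a < pvKey b := by
    intro i j hij a ha b hb
    have hai := (pvMem_bucketOut files i a).mp ha
    have hbj := (pvMem_bucketOut files j b).mp hb
    simp only [pvKey, Prod.Lex.toLex_lt_toLex]
    left; rw [hai.2, hbj.2]; exact hij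
  simp only [List.pairwise_append]
  refine ⟨⟨⟨⟨pvBucketOut_pairwise files 1, pvBucketOut_pairwise files 2, ?_⟩,
      pvBucketOut_pairwise files 3, ?_⟩, pvBucketOut_pairwise files 4, ?_⟩,
      pvBucketOut_pairwise files 5, ?_⟩ <;> intro a ha b hb
  · exact cross 1 2 (by norm_num) a ha b hb
  · rcases List.mem_append.mp ha with h | h
    · exact cross 1 3 (by norm_num) a h b hb
    · exact cross 2 3 (by norm_num) a h b hb
  · rcases List.mem_append.mp ha with h | h
    · rcases List.mem_append.mp h with h' | h'
      · exact cross 1 4 (by norm_num) a h' b hb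
      · exact cross 2 4 (by norm_num) a h' b hb
    · exact cross 3 4 (by norm_num) a h b hb
  · rcases List.mem_append.mp ha with h | h
    · rcases List.mem_append.mp h with h' | h'
      · rcases List.mem_append.mp h' with h'' | h''
        · exact cross 1 5 (by norm_num) a h'' b hb
        · exact cross 2 5 (by norm_num) a h'' b hb
      · exact cross 3 5 (by norm_num) a h' b hb
    · exact cross 4 5 (by norm_num) a h b hb

theorem pvMain (files : List String) :
    sort_and_optimize_files_py files = sort_and_optimize_files_py_alt files := by
  rw [pvA_eq_dedup, pvB_eq]
  set L := PySem.Set.ofList (PySem.List.sorted files pvKey) with hL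
  set R := pvBucketOut files 1 ++ pvBucketOut files 2 ++ pvBucketOut files 3 ++
      pvBucketOut files 4 ++ pvBucketOut files 5 with hR
  have hRpw := pvRHS_pairwise files
  rw [← hR] at hRpw
  have hLnd : L.Nodup := PySem.Set.nodup_ofList _
  have hRnd : R.Nodup := hRpw.imp (fun h hab => by subst hab; exact lt_irrefl _ h)
  have hmemL : ∀ x, x ∈ L ↔ x ∈ files := by
    intro x
    rw [hL, PySem.Set.mem_ofList, PySem.List.mem_sorted]
  have hmemR : ∀ x, x ∈ R ↔ x ∈ files := by
    intro x
    simp only [hR, List.mem_append, pvMem_bucketOut]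
    constructor
    · rintro ((((⟨h, _⟩ | ⟨h, _⟩) | ⟨h, _⟩) | ⟨h, _⟩) | ⟨h, _⟩) <;> exact h
    · intro hx
      rcases pvPrio_range x with h | h | h | h | h
      · exact Or.inl (Or.inl (Or.inl (Or.inl ⟨hx, h⟩)))
      · exact Or.inl (Or.inl (Or.inl (Or.inr ⟨hx, h⟩)))
      · exact Or.inl (Or.inl (Or.inr ⟨hx, h⟩))
      · exact Or.inl (Or.inr ⟨hx, h⟩)
      · exact Or.inr ⟨hx, h⟩
  have hperm : L.Perm R := by
    rw [List.perm_ext_iff_of_nodup hLnd hRnd]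
    intro x; rw [hmemL x, hmemR x]
  have hLpw : L.Pairwise (fun a b => pvKey a ≤ pvKey b) := by
    have hsub : L.Sublist (PySem.List.sorted files pvKey) := by
      rw [hL]
      simpa using pvFoldlAdd_sublist (PySem.List.sorted files pvKey) []
    exact (PySem.List.sorted_pairwise files pvKey).sublist hsub
  exact PySem.List.eq_of_perm_of_pairwise_le_of_injective pvKey pvKey_injective hperm hLpw
    (hRpw.imp (fun h => le_of_lt h))

-- ===== VERDICT (by name: the statement is the Claim_ definition above) =====
theorem sort_and_optimize_files_py_spec : Claim_equal_sort_and_optimize_files_py := by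
  intro files _
  unfold Spec_sort_and_optimize_files_py
  exact pvMain files
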